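-- pv_equiv track=rewrite | github.com/biddls/AI_3rdYr_Dissertation | src/graphVisu.py | nodeOrdering
-- ===== SOURCE A (Python) =====
-- def nodeOrdering(nodes: [str]) -> [str]:
--     new = []
--     cont = ''
--     current = 'F'
--     for index, node in enumerate(sorted(nodes)):
--         if node.split('.')[0] == node:
--             cont = node
--         elif node.split('.')[1] != current:
--             if current == 'F':
--                 new.append(cont)
--             new.append(node)
--             current = node.split('.')[1]
--         else:
--             new.append(node)
--     return new
-- ===== SOURCE B (Python) =====
-- def nodeOrdering(nodes: [str]) -> [str]:
--     # pass 1: collect the dotted nodes in sorted order, each paired with the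
--     # most recent undotted (container) node preceding it in that order
--     pairs = []
--     cont = ''
--     for n in sorted(nodes):
--         if '.' in n:
--             pairs.append((n, cont))
--         else:
--             cont = n
--     # pass 2: group by the segment after the first dot; start a new group when
--     # the segment changes, emitting the paired container when leaving state 'F'
--     out = []
--     prev = 'F'
--     for n, c in pairs:
--         suf = n.split('.')[1]
--         if suf == prev:
--             out.append(n)
--         else:
--             if prev == 'F':
--                 out.append(c)
--             out.append(n)
--             prev = suf
--     return out
-- ===== Notes on version B (the rewrite author's own statement) =====
-- stated objective: alternative
-- what changed: A's single stateful loop (new/cont/current juggled together) is split into two independent passes: pass 1 pairs each dotted node with the container node last seen before it in sorted order, pass 2 does the grouping by the segment after the first dot; same O(n log n) cost dominated by the sort.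
import Mathlib
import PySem

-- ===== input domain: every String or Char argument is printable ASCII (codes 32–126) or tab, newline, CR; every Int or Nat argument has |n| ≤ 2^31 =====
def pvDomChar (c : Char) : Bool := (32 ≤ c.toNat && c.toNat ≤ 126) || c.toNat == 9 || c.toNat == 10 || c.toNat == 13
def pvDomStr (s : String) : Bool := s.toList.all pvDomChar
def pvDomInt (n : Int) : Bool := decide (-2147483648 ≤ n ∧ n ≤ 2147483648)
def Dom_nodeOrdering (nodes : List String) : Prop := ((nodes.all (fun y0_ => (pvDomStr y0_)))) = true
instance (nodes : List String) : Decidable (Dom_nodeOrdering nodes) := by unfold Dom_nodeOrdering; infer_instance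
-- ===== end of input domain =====

-- B reorders the same nodes with a different decomposition: one pass pairing each dotted
-- node with its current container, then a second pass doing the grouping (objective: alternative).

-- ===== PORT A =====
-- A's single loop over sorted(nodes) with state (new, cont, current).
def nodeOrderingGoA : List String → List String → String → String → List String
  | [], new, _cont, _current => new
  | node :: rest, new, cont, current =>
    if ((PySem.Str.split? node ".").getD []).getD 0 "" == node then
      nodeOrderingGoA rest new node current
    else if ((PySem.Str.split? node ".").getD []).getD 1 "" != current then
      nodeOrderingGoA rest ((if current == "F" then new ++ [cont] else new) ++ [node])
        cont (((PySem.Str.split? node ".").getD []).getD 1 "")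
    else
      nodeOrderingGoA rest (new ++ [node]) cont current

def nodeOrdering (nodes : List String) : List String :=
  nodeOrderingGoA (PySem.List.sorted nodes (fun x => x) false) [] "" "F"

-- ===== PORT B =====
-- pass 1: dotted nodes (in sorted order) paired with the last undotted node seen before each
def nodeOrderingPass1 : List String → String → List (String × String)
  | [], _cont => []
  | n :: rest, cont =>
    if PySem.Str.isIn "." n then (n, cont) :: nodeOrderingPass1 rest cont
    else nodeOrderingPass1 rest n

-- pass 2: group by the segment after the first dot, emitting the container when leaving 'F'
def nodeOrderingPass2 : List (String × String) → String → List String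
  | [], _prev => []
  | (n, c) :: rest, prev =>
    if ((PySem.Str.split? n ".").getD []).getD 1 "" == prev then n :: nodeOrderingPass2 rest prev
    else (if prev == "F" then [c] else [])
      ++ n :: nodeOrderingPass2 rest (((PySem.Str.split? n ".").getD []).getD 1 "")

def nodeOrdering_alt (nodes : List String) : List String :=
  nodeOrderingPass2 (nodeOrderingPass1 (PySem.List.sorted nodes (fun x => x) false) "") "F"

-- ===== PRECONDITION & SPEC =====
def Spec_nodeOrdering (nodes : List String) (out : List String) : Prop := out = nodeOrdering_alt nodes
instance (nodes : List String) (out : List String) : Decidable (Spec_nodeOrdering nodes out) := by unfold Spec_nodeOrdering; infer_instance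

-- ===== CLAIM (what is proved, stated in full; the proofs are below) =====
def Claim_equal_nodeOrdering : Prop := ∀ (nodes : List String), Dom_nodeOrdering nodes → Spec_nodeOrdering nodes (nodeOrdering nodes)

-- ===== LEMMAS AND PROOFS =====

-- splitOn.go with a single-char separator not occurring in the remaining input
theorem splitOnGo_not_mem (c : Char) : ∀ (fuel : Nat) (l cur : List Char) (acc : List (List Char)),
    c ∉ l → PySem.Chars.splitOn.go [c] fuel l cur acc = ((cur.reverse ++ l) :: acc).reverse := by
  intro fuel
  induction fuel with
  | zero => intro l cur acc _; cases l <;> simp [PySem.Chars.splitOn.go]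
  | succ fuel ih =>
    intro l cur acc h
    cases l with
    | nil => simp [PySem.Chars.splitOn.go]
    | cons ch rest =>
      have hch : ¬ (c = ch) := fun he => h (he ▸ List.mem_cons_self ..)
      have hpre : [c].isPrefixOf (ch :: rest) = false := by
        simp [List.isPrefixOf]; exact hch
      rw [PySem.Chars.splitOn.go]
      simp only [hpre, Bool.false_eq_true, if_false]
      rw [ih rest (ch :: cur) acc (fun hm => h (List.mem_cons_of_mem _ hm))]
      simp

-- splitOn.go with the separator occurring: the first emitted piece is cur.reverse ++ takeWhile
theorem splitOnGo_mem (c : Char) : ∀ (fuel : Nat) (l cur : List Char) (acc : List (List Char)),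
    l.length < fuel → c ∈ l →
    ∃ tail, PySem.Chars.splitOn.go [c] fuel l cur acc
      = acc.reverse ++ (cur.reverse ++ l.takeWhile (fun x => !(x == c))) :: tail := by
  intro fuel
  induction fuel with
  | zero => intro l cur acc h _; omega
  | succ fuel ih =>
    intro l cur acc hlen hm
    cases l with
    | nil => simp at hm
    | cons ch rest =>
      by_cases hch : c = ch
      · subst hch
        have hpre : [c].isPrefixOf (c :: rest) = true := by simp [List.isPrefixOf]
        rw [PySem.Chars.splitOn.go]
        simp only [hpre, if_true, List.length_cons, List.length_nil, List.drop_succ_cons,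
          List.drop_zero]
        by_cases hr : c ∈ rest
        · obtain ⟨tail, ht⟩ := ih rest [] (cur.reverse :: acc) (by simp at hlen; omega) hr
          refine ⟨List.takeWhile (fun x => !(x == c)) rest :: tail, ?_⟩
          rw [ht]; simp
        · rw [splitOnGo_not_mem c fuel rest [] (cur.reverse :: acc) hr]
          exact ⟨[rest], by simp⟩
      · have hpre : [c].isPrefixOf (ch :: rest) = false := by
          simp [List.isPrefixOf]; exact hch
        have hr : c ∈ rest := by cases hm with
          | head => exact absurd rfl hch
          | tail _ h => exact h
        rw [PySem.Chars.splitOn.go]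
        simp only [hpre, Bool.false_eq_true, if_false]
        obtain ⟨tail, ht⟩ := ih rest (ch :: cur) acc (by simp at hlen ⊢; omega) hr
        refine ⟨tail, ?_⟩
        rw [ht]
        have : (ch :: rest).takeWhile (fun x => !(x == c)) = ch :: rest.takeWhile (fun x => !(x == c)) := by
          simp [Ne.symm hch]
        rw [this]; simp

theorem splitOn_of_not_mem (c : Char) (s : List Char) (h : c ∉ s) :
    PySem.Chars.splitOn s [c] = [s] := by
  unfold PySem.Chars.splitOn
  rw [splitOnGo_not_mem c _ s [] [] h]; simp

theorem splitOn_head_of_mem (c : Char) (s : List Char) (h : c ∈ s) :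
    ∃ tail, PySem.Chars.splitOn s [c] = s.takeWhile (fun x => !(x == c)) :: tail := by
  unfold PySem.Chars.splitOn
  obtain ⟨tail, ht⟩ := splitOnGo_mem c (s.length + 1) s [] [] (by omega) h
  exact ⟨tail, by rw [ht]; simp⟩

-- membership of '.' as an infix of a single character
theorem singleton_infix_iff_mem (c : Char) (l : List Char) : [c] <:+: l ↔ c ∈ l := by
  constructor
  · rintro ⟨pre, suf, h⟩; subst h; simp
  · intro h
    obtain ⟨pre, suf, h⟩ := List.append_of_mem h
    exact ⟨pre, suf, by rw [h]; simp⟩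

-- the crux: A's "no dot" test equals the negation of B's "'.' in n" test
theorem dotted_test (n : String) :
    ((((PySem.Str.split? n ".").getD []).getD 0 "" == n)) = !(PySem.Str.isIn "." n) := by
  have hIn : PySem.Str.isIn "." n = PySem.Chars.isIn ['.'] n.toList := rfl
  by_cases hm : '.' ∈ n.toList
  · have h1 : PySem.Chars.isIn ['.'] n.toList = true :=
      (PySem.Chars.isIn_iff_infix _ _).mpr ((singleton_infix_iff_mem _ _).mpr hm)
    obtain ⟨tail, ht⟩ := splitOn_head_of_mem '.' n.toList hm
    have hsplit : PySem.Str.split? n "." =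
        some ((PySem.Chars.splitOn n.toList ['.']).map String.ofList) := rfl
    rw [hIn, h1, hsplit]
    simp only [Option.getD_some, ht, List.map_cons, List.getD_cons_zero, Bool.not_true]
    rw [beq_eq_false_iff_ne]
    intro he
    have : (n.toList.takeWhile (fun x => !(x == '.'))) = n.toList := by
      have := congrArg String.toList he
      simpa using this
    have hall := List.takeWhile_eq_self_iff.mp this
    have := hall _ hm
    simp at this
  · have h1 : PySem.Chars.isIn ['.'] n.toList = false := by
      rw [PySem.Chars.isIn_eq_false_iff]
      intro hinf; exact hm ((singleton_infix_iff_mem _ _).mp hinf)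
    have hsplit : PySem.Str.split? n "." =
        some ((PySem.Chars.splitOn n.toList ['.']).map String.ofList) := rfl
    rw [hIn, h1, hsplit, splitOn_of_not_mem '.' n.toList hm]
    simp

-- unfolding of B's pass 2 on a cons cell
theorem pass2_cons (n c : String) (rest : List (String × String)) (prev : String) :
    nodeOrderingPass2 ((n, c) :: rest) prev
      = if ((PySem.Str.split? n ".").getD []).getD 1 "" == prev
        then n :: nodeOrderingPass2 rest prev
        else (if prev == "F" then [c] else [])
          ++ n :: nodeOrderingPass2 rest (((PySem.Str.split? n ".").getD []).getD 1 "") := rfl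

-- the loop of A computes pass2 ∘ pass1 of B, for every intermediate state
theorem goA_eq_pass2_pass1 : ∀ (s acc : List String) (cont current : String),
    nodeOrderingGoA s acc cont current
      = acc ++ nodeOrderingPass2 (nodeOrderingPass1 s cont) current := by
  intro s
  induction s with
  | nil => intro acc cont current; simp [nodeOrderingGoA, nodeOrderingPass1, nodeOrderingPass2]
  | cons n rest ih =>
    intro acc cont current
    rw [nodeOrderingGoA, nodeOrderingPass1]
    cases hd : PySem.Str.isIn "." n with
    | false =>
      -- undotted node: A updates cont, B's pass 1 updates cont
      have htest : (((PySem.Str.split? n ".").getD []).getD 0 "" == n) = true := by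
        rw [dotted_test, hd]; rfl
      simp only [htest, if_true, Bool.false_eq_true, if_false]
      exact ih acc n current
    | true =>
      -- dotted node
      have htest : (((PySem.Str.split? n ".").getD []).getD 0 "" == n) = false := by
        rw [dotted_test, hd]; rfl
      simp only [htest, Bool.false_eq_true, if_false, eq_self_iff_true, if_true]
      rw [pass2_cons]
      cases hsc : (((PySem.Str.split? n ".").getD []).getD 1 "" == current) with
      | false =>
        -- the segment after the dot changes
        have hb : (((PySem.Str.split? n ".").getD []).getD 1 "" != current) = true := by
          simp only [bne]; rw [hsc]; rfl
        simp only [hb, if_true]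
        rw [ih]
        by_cases hc : current = "F"
        · have hcb : (current == "F") = true := by rw [hc]; rfl
          simp only [hcb, if_true]
          simp
        · have hcb : (current == "F") = false := by
            rw [beq_eq_false_iff_ne]; exact hc
          simp only [hcb, Bool.false_eq_true, if_false]
          simp
      | true =>
        -- same segment
        have hb : (((PySem.Str.split? n ".").getD []).getD 1 "" != current) = false := by
          simp only [bne]; rw [hsc]; rfl
        simp only [hb, Bool.false_eq_true, if_false]
        rw [ih]
        simp

-- ===== VERDICT (by name: the statement is the Claim_ definition above) =====
theorem nodeOrdering_spec : Claim_equal_nodeOrdering := by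
  intro nodes _
  unfold Spec_nodeOrdering nodeOrdering nodeOrdering_alt
  rw [goA_eq_pass2_pass1]; simp
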